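-- pv_equiv track=rewrite | github.com/skywhat/leetcode | Python3/3071.py | solve
-- ===== SOURCE A (Python) =====
-- def solve(grid, isY, notY):
--     n = len(grid)
--     op = 0
--     for i in range(n):
--         for j in range(n):
--             if (i <= n//2 and (i==j or i+j==n-1)) or (i> n//2 and j==n//2):
--                 if grid[i][j] != isY:
--                     op +=1
--             else:
--                 if grid[i][j] != notY:
--                     op +=1
--     return op
-- ===== SOURCE B (Python) =====
-- def solve(grid, isY, notY):
--     # One full pass over the n x n grid counts every cell against notY; then only
--     # the O(n) special X-pattern coordinates are adjusted (the centre cell of an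
--     # odd-sized grid is deduplicated so it is adjusted once).
--     n = len(grid)
--     total = sum(1 for row in grid for v in row[:n] if v != notY)
--     half = n // 2
--     for i in range(n):
--         if i <= half:
--             cols = [i] if i == n - 1 - i else [i, n - 1 - i]
--         else:
--             cols = [half]
--         for j in cols:
--             v = grid[i][j]
--             if v != notY:
--                 total -= 1
--             if v != isY:
--                 total += 1
--     return total
-- ===== Notes on version B (the rewrite author's own statement) =====
-- stated objective: alternative
-- what changed: Instead of classifying every cell inside the nested scan, B counts all cells differing from notY in one plain pass and then adjusts only the O(n) deduplicated X-pattern coordinates (two diagonal cells per upper row, the middle column below).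
import Mathlib
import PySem

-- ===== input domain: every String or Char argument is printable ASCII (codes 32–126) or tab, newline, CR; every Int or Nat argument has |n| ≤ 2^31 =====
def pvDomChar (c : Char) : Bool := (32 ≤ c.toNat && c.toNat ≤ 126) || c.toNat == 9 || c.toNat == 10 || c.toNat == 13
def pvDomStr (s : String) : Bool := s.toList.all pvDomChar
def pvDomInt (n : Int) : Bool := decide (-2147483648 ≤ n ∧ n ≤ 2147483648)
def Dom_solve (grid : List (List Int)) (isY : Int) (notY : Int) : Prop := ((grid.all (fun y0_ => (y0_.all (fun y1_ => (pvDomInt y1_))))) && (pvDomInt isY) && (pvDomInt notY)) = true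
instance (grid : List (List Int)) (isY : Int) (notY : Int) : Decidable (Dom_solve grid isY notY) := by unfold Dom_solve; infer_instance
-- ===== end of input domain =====

-- B replaces A's per-cell X-pattern classification by one plain count of the whole
-- grid against notY plus an adjustment at the deduplicated special coordinates.

-- ===== PORT A =====
def solve (grid : List (List Int)) (isY : Int) (notY : Int) : Int :=
  let n : Int := (grid.length : Int)
  (PySem.List.pyRange 0 n 1).foldl (fun op i =>
    (PySem.List.pyRange 0 n 1).foldl (fun op j =>
      if (i ≤ PySem.Int.floordiv n 2 ∧ (i = j ∨ i + j = n - 1)) ∨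
         (PySem.Int.floordiv n 2 < i ∧ j = PySem.Int.floordiv n 2) then
        if PySem.List.pyGetD (PySem.List.pyGetD grid i []) j 0 ≠ isY then op + 1 else op
      else
        if PySem.List.pyGetD (PySem.List.pyGetD grid i []) j 0 ≠ notY then op + 1 else op)
      op) 0

-- ===== PORT B =====
def solve_alt (grid : List (List Int)) (isY : Int) (notY : Int) : Int :=
  let n : Int := (grid.length : Int)
  let total : Int := grid.foldl (fun acc row =>
    (PySem.List.slice row none (some n)).foldl
      (fun acc v => if v ≠ notY then acc + 1 else acc) acc) 0
  let half := PySem.Int.floordiv n 2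
  (PySem.List.pyRange 0 n 1).foldl (fun total i =>
    let cols : List Int := if i ≤ half then (if i = n - 1 - i then [i] else [i, n - 1 - i]) else [half]
    cols.foldl (fun total j =>
      let v := PySem.List.pyGetD (PySem.List.pyGetD grid i []) j 0
      let total := if v ≠ notY then total - 1 else total
      if v ≠ isY then total + 1 else total) total) total

-- ===== PRECONDITION & SPEC =====
-- Pre_ excludes exactly the inputs on which A raises IndexError: a nonempty grid
-- with some row shorter than the number of rows.
def Pre_solve (grid : List (List Int)) (isY : Int) (notY : Int) : Prop :=
  ∀ row ∈ grid, grid.length ≤ row.length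
instance (grid : List (List Int)) (isY : Int) (notY : Int) : Decidable (Pre_solve grid isY notY) := by unfold Pre_solve; infer_instance
def pvWitness_solve : List (List Int) × Int × Int := ([[1, 2], [3, 4]], 1, 2)

def Spec_solve (grid : List (List Int)) (isY : Int) (notY : Int) (out : Int) : Prop := out = solve_alt grid isY notY
instance (grid : List (List Int)) (isY : Int) (notY : Int) (out : Int) : Decidable (Spec_solve grid isY notY out) := by unfold Spec_solve; infer_instance

-- ===== CLAIM (what is proved, stated in full; the proofs are below) =====
def Claim_equal_solve : Prop := ∀ (grid : List (List Int)) (isY : Int) (notY : Int), Dom_solve grid isY notY → Pre_solve grid isY notY → Spec_solve grid isY notY (solve grid isY notY)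

-- ===== LEMMAS AND PROOFS =====

-- indicator "cell value differs from y"
def pvInd (y v : Int) : Int := if v ≠ y then 1 else 0
-- the cell grid[i][j] as the ports read it
def pvVal (grid : List (List Int)) (i j : Int) : Int :=
  PySem.List.pyGetD (PySem.List.pyGetD grid i []) j 0
-- A's per-cell contribution
def pvGA (grid : List (List Int)) (isY notY i j : Int) : Int :=
  if (i ≤ PySem.Int.floordiv (grid.length : Int) 2 ∧ (i = j ∨ i + j = (grid.length : Int) - 1)) ∨
     (PySem.Int.floordiv (grid.length : Int) 2 < i ∧ j = PySem.Int.floordiv (grid.length : Int) 2)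
  then pvInd isY (pvVal grid i j) else pvInd notY (pvVal grid i j)
-- B's per-special-cell adjustment
def pvDelta (grid : List (List Int)) (isY notY i j : Int) : Int :=
  pvInd isY (pvVal grid i j) - pvInd notY (pvVal grid i j)
-- B's special columns of row i
def pvCols (N i : Int) : List Int :=
  if i ≤ PySem.Int.floordiv N 2 then
    (if i = N - 1 - i then [i] else [i, N - 1 - i])
  else [PySem.Int.floordiv N 2]
-- B's per-row adjustment
def pvAdj (grid : List (List Int)) (isY notY i : Int) : Int :=
  ((pvCols (grid.length : Int) i).map (fun j => pvDelta grid isY notY i j)).sum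
-- count of row cells ≠ notY over column indices [0, N)
def pvRowCnt (N notY : Int) (row : List Int) : Int :=
  ((PySem.List.pyRange 0 N 1).map (fun j => pvInd notY (PySem.List.pyGetD row j 0))).sum

theorem pvA_inner (grid : List (List Int)) (isY notY i acc : Int) :
    (PySem.List.pyRange 0 (grid.length : Int) 1).foldl (fun op j =>
      if (i ≤ PySem.Int.floordiv (grid.length : Int) 2 ∧ (i = j ∨ i + j = (grid.length : Int) - 1)) ∨
         (PySem.Int.floordiv (grid.length : Int) 2 < i ∧ j = PySem.Int.floordiv (grid.length : Int) 2) then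
        if PySem.List.pyGetD (PySem.List.pyGetD grid i []) j 0 ≠ isY then op + 1 else op
      else
        if PySem.List.pyGetD (PySem.List.pyGetD grid i []) j 0 ≠ notY then op + 1 else op) acc
    = acc + ((PySem.List.pyRange 0 (grid.length : Int) 1).map (fun j => pvGA grid isY notY i j)).sum := by
  have hstep : (fun (op j : Int) =>
      if (i ≤ PySem.Int.floordiv (grid.length : Int) 2 ∧ (i = j ∨ i + j = (grid.length : Int) - 1)) ∨
         (PySem.Int.floordiv (grid.length : Int) 2 < i ∧ j = PySem.Int.floordiv (grid.length : Int) 2) then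
        if PySem.List.pyGetD (PySem.List.pyGetD grid i []) j 0 ≠ isY then op + 1 else op
      else
        if PySem.List.pyGetD (PySem.List.pyGetD grid i []) j 0 ≠ notY then op + 1 else op)
      = fun op j => op + pvGA grid isY notY i j := by
    funext a j
    simp only [pvGA, pvInd, pvVal]
    split_ifs <;> ring
  rw [hstep, PySem.List.foldl_add]

theorem pvA_eq (grid : List (List Int)) (isY notY : Int) :
    solve grid isY notY =
      ((PySem.List.pyRange 0 (grid.length : Int) 1).map
        (fun i => ((PySem.List.pyRange 0 (grid.length : Int) 1).map (fun j => pvGA grid isY notY i j)).sum)).sum := by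
  simp only [solve]
  simp only [pvA_inner]
  rw [PySem.List.foldl_add, zero_add]

theorem pvB_eq (grid : List (List Int)) (isY notY : Int) :
    solve_alt grid isY notY =
      (grid.map (fun row => ((PySem.List.slice row none (some (grid.length : Int))).countP (fun v => v ≠ notY) : Int))).sum
      + ((PySem.List.pyRange 0 (grid.length : Int) 1).map (fun i => pvAdj grid isY notY i)).sum := by
  simp only [solve_alt]
  have hmain : ∀ (acc i : Int), i ∈ PySem.List.pyRange 0 (grid.length : Int) 1 →
      (if i ≤ PySem.Int.floordiv (grid.length : Int) 2 then
        (if i = (grid.length : Int) - 1 - i then [i] else [i, (grid.length : Int) - 1 - i])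
       else [PySem.Int.floordiv (grid.length : Int) 2]).foldl (fun total j =>
        if PySem.List.pyGetD (PySem.List.pyGetD grid i []) j 0 ≠ isY then
          (if PySem.List.pyGetD (PySem.List.pyGetD grid i []) j 0 ≠ notY then total - 1 else total) + 1
        else
          (if PySem.List.pyGetD (PySem.List.pyGetD grid i []) j 0 ≠ notY then total - 1 else total)) acc
      = acc + pvAdj grid isY notY i := by
    intro acc i _
    have hstep : (fun (total j : Int) =>
        if PySem.List.pyGetD (PySem.List.pyGetD grid i []) j 0 ≠ isY then
          (if PySem.List.pyGetD (PySem.List.pyGetD grid i []) j 0 ≠ notY then total - 1 else total) + 1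
        else
          (if PySem.List.pyGetD (PySem.List.pyGetD grid i []) j 0 ≠ notY then total - 1 else total))
        = fun total j => total + pvDelta grid isY notY i j := by
      funext a j
      simp only [pvDelta, pvInd, pvVal]
      split_ifs <;> ring
    rw [hstep, PySem.List.foldl_add]
    rfl
  rw [PySem.List.foldl_congr_mem _ _ _ _ hmain, PySem.List.foldl_add]
  have hrow : ∀ (acc : Int), ∀ row ∈ grid,
      (PySem.List.slice row none (some (grid.length : Int))).foldl
        (fun acc v => if v ≠ notY then acc + 1 else acc) acc
      = acc + ((PySem.List.slice row none (some (grid.length : Int))).countP (fun v => v ≠ notY) : Int) := by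
    intro acc row _
    exact PySem.List.foldl_ite_add_one _ _ _
  rw [PySem.List.foldl_congr_mem _ _ _ _ hrow, PySem.List.foldl_add, zero_add]

theorem pvIndic_sum (grid : List (List Int)) (isY notY i : Int)
    (h0 : 0 ≤ i) (h1 : i < (grid.length : Int)) :
    ((PySem.List.pyRange 0 (grid.length : Int) 1).map
      (fun j => if (i ≤ PySem.Int.floordiv (grid.length : Int) 2 ∧ (i = j ∨ i + j = (grid.length : Int) - 1)) ∨
         (PySem.Int.floordiv (grid.length : Int) 2 < i ∧ j = PySem.Int.floordiv (grid.length : Int) 2)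
        then pvDelta grid isY notY i j else 0)).sum = pvAdj grid isY notY i := by
  have hhalf : PySem.Int.floordiv (grid.length : Int) 2 = (grid.length : Int) / 2 :=
    PySem.Int.floordiv_eq_ediv_of_pos (by omega)
  have hnd : (PySem.List.pyRange 0 (grid.length : Int) 1).Nodup := PySem.List.nodup_pyRange_one 0 _
  have hmem : ∀ x : Int, x ∈ (PySem.List.pyRange 0 (grid.length : Int) 1).toFinset ↔ 0 ≤ x ∧ x < (grid.length : Int) := by
    intro x
    rw [List.mem_toFinset, PySem.List.mem_pyRange_one]
  simp only [pvAdj, pvCols, hhalf]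
  rw [← List.sum_toFinset _ hnd]
  by_cases hle : i ≤ (grid.length : Int) / 2
  · by_cases heq : i = (grid.length : Int) - 1 - i
    · have hpt : ∀ j ∈ (PySem.List.pyRange 0 (grid.length : Int) 1).toFinset,
          (if (i ≤ (grid.length : Int) / 2 ∧ (i = j ∨ i + j = (grid.length : Int) - 1)) ∨
             ((grid.length : Int) / 2 < i ∧ j = (grid.length : Int) / 2)
           then pvDelta grid isY notY i j else 0)
          = (if j = i then pvDelta grid isY notY i j else 0) := by
        intro j _
        split_ifs <;> first | rfl | omega
      rw [Finset.sum_congr rfl hpt, Finset.sum_ite_eq',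
        if_pos ((hmem i).mpr ⟨h0, h1⟩), if_pos hle, if_pos heq]
      simp
    · have hpt : ∀ j ∈ (PySem.List.pyRange 0 (grid.length : Int) 1).toFinset,
          (if (i ≤ (grid.length : Int) / 2 ∧ (i = j ∨ i + j = (grid.length : Int) - 1)) ∨
             ((grid.length : Int) / 2 < i ∧ j = (grid.length : Int) / 2)
           then pvDelta grid isY notY i j else 0)
          = (if j = i then pvDelta grid isY notY i j else 0)
            + (if j = (grid.length : Int) - 1 - i then pvDelta grid isY notY i j else 0) := by
        intro j _
        split_ifs <;> first | ring1 | (exfalso; omega)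
      rw [Finset.sum_congr rfl hpt, Finset.sum_add_distrib, Finset.sum_ite_eq', Finset.sum_ite_eq',
        if_pos ((hmem i).mpr ⟨h0, h1⟩), if_pos ((hmem _).mpr ⟨by omega, by omega⟩),
        if_pos hle, if_neg heq]
      simp
  · have hpt : ∀ j ∈ (PySem.List.pyRange 0 (grid.length : Int) 1).toFinset,
        (if (i ≤ (grid.length : Int) / 2 ∧ (i = j ∨ i + j = (grid.length : Int) - 1)) ∨
           ((grid.length : Int) / 2 < i ∧ j = (grid.length : Int) / 2)
         then pvDelta grid isY notY i j else 0)
        = (if j = (grid.length : Int) / 2 then pvDelta grid isY notY i j else 0) := by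
      intro j _
      split_ifs <;> first | rfl | omega
    rw [Finset.sum_congr rfl hpt, Finset.sum_ite_eq',
      if_pos ((hmem _).mpr ⟨by omega, by omega⟩), if_neg hle]
    simp

theorem pvRow_eq (grid : List (List Int)) (isY notY i : Int)
    (h0 : 0 ≤ i) (h1 : i < (grid.length : Int)) :
    ((PySem.List.pyRange 0 (grid.length : Int) 1).map (fun j => pvGA grid isY notY i j)).sum
      = pvRowCnt (grid.length : Int) notY (PySem.List.pyGetD grid i []) + pvAdj grid isY notY i := by
  have hpt : ∀ j : Int, pvGA grid isY notY i j
      = pvInd notY (pvVal grid i j)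
        + (if (i ≤ PySem.Int.floordiv (grid.length : Int) 2 ∧ (i = j ∨ i + j = (grid.length : Int) - 1)) ∨
             (PySem.Int.floordiv (grid.length : Int) 2 < i ∧ j = PySem.Int.floordiv (grid.length : Int) 2)
           then pvDelta grid isY notY i j else 0) := by
    intro j
    simp only [pvGA, pvDelta]
    split_ifs <;> ring
  simp only [hpt]
  rw [PySem.List.sum_map_add_int, pvIndic_sum grid isY notY i h0 h1]
  simp only [pvRowCnt, pvVal]

theorem pvRowCnt_eq (n : Nat) (notY : Int) (row : List Int) (h : n ≤ row.length) :
    pvRowCnt (n : Int) notY row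
      = ((PySem.List.slice row none (some (n : Int))).countP (fun v => v ≠ notY) : Int) := by
  rw [PySem.List.slice_to_natCast]
  induction n with
  | zero =>
    simp [pvRowCnt]
  | succ m ih =>
    have hm : m ≤ row.length := Nat.le_of_succ_le h
    have hgl : m < row.length := h
    have hcast : ((m + 1 : Nat) : Int) = (m : Int) + 1 := by push_cast; ring
    have hstep : pvRowCnt ((m : Int) + 1) notY row
        = pvRowCnt (m : Int) notY row + pvInd notY (PySem.List.pyGetD row (m : Int) 0) := by
      unfold pvRowCnt
      rw [PySem.List.pyRange_one_succ_right (by positivity), List.map_append, List.sum_append]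
      simp
    have hget : PySem.List.pyGetD row (m : Int) 0 = row[m] := by
      rw [PySem.List.pyGetD_natCast]
      exact List.getD_eq_getElem row 0 hgl
    rw [hcast, hstep, ih hm, List.take_add_one, List.getElem?_eq_getElem hgl]
    simp only [List.countP_append, List.countP_cons, Option.toList_some, hget, pvInd,
      List.countP_nil]
    by_cases hv : row[m] ≠ notY <;> simp [hv]

-- ===== VERDICT (by name: the statement is the Claim_ definition above) =====
theorem solve_spec : Claim_equal_solve := by
  intro grid isY notY _ hpre
  show solve grid isY notY = solve_alt grid isY notY
  rw [pvA_eq, pvB_eq]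
  have hmemrow : ∀ i ∈ PySem.List.pyRange 0 (grid.length : Int) 1,
      ((PySem.List.pyRange 0 (grid.length : Int) 1).map (fun j => pvGA grid isY notY i j)).sum
        = pvRowCnt (grid.length : Int) notY (PySem.List.pyGetD grid i []) + pvAdj grid isY notY i := by
    intro i hi
    have hib := PySem.List.mem_pyRange_one.mp hi
    exact pvRow_eq grid isY notY i hib.1 hib.2
  rw [List.map_congr_left hmemrow, PySem.List.sum_map_add_int]
  congr 1
  rw [show (fun i => pvRowCnt (grid.length : Int) notY (PySem.List.pyGetD grid i []))
        = ((pvRowCnt (grid.length : Int) notY) ∘ (fun i => PySem.List.pyGetD grid i ([] : List Int))) from rfl,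
    ← List.map_map, PySem.List.map_pyGetD_pyRange_zero']
  refine congrArg List.sum (List.map_congr_left ?_)
  intro row hrow
  exact pvRowCnt_eq grid.length notY row (hpre row hrow)
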